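-- pv_equiv track=rewrite | github.com/koboltze-py/Nesk-Word | _erstelle_p9_v2.py | _nach_schicht
-- ===== SOURCE A (Python) =====
-- def _ist_tag(p):
--     """Tagdienst = Beginn vor 14:00"""
--     s = (p.get('start_zeit') or '00:00')[:5]
--     try: return int(s.split(':')[0]) < 14
--     except: return True
--
-- def _zeit(p):
--     s = (p.get('start_zeit') or '')[:5]
--     e = (p.get('end_zeit')   or '')[:5]
--     return f"{s}–{e}" if s and e else ''
--
-- def _nach_schicht(d, typ='betreuer'):
--     """Gibt {'DT': [(name, zeit)], 'DN': [(name, zeit)]} zurück"""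
--     dt, dn = [], []
--     for p in d.get(typ, []):
--         if p.get('ist_krank') in (True, 'True'): continue
--         name = p.get('anzeigename', '').strip()
--         if not name: continue
--         z = _zeit(p)
--         if _ist_tag(p): dt.append((name, z))
--         else:           dn.append((name, z))
--     dt.sort(key=lambda x: x[0])
--     dn.sort(key=lambda x: x[0])
--     return {'DT': dt, 'DN': dn}
-- ===== SOURCE B (Python) =====
-- def _ist_tag(p):
--     """Tagdienst = Beginn vor 14:00"""
--     s = (p.get('start_zeit') or '00:00')[:5]
--     try: return int(s.split(':')[0]) < 14
--     except: return True
--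
-- def _zeit(p):
--     s = (p.get('start_zeit') or '')[:5]
--     e = (p.get('end_zeit')   or '')[:5]
--     return f"{s}–{e}" if s and e else ''
--
-- def _uebernehmen(p):
--     """Keep the record iff not sick and the stripped display name is non-empty."""
--     return p.get('ist_krank') not in (True, 'True') and bool(p.get('anzeigename', '').strip())
--
-- def _nach_schicht(d, typ='betreuer'):
--     """Gibt {'DT': [(name, zeit)], 'DN': [(name, zeit)]} zurück"""
--     # sort the raw records once, stably, by stripped display name; then one
--     # filtering/splitting pass -- no per-bucket sorts needed.
--     geordnet = sorted(d.get(typ, []), key=lambda p: p.get('anzeigename', '').strip())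
--     dt = [(p.get('anzeigename', '').strip(), _zeit(p))
--           for p in geordnet if _uebernehmen(p) and _ist_tag(p)]
--     dn = [(p.get('anzeigename', '').strip(), _zeit(p))
--           for p in geordnet if _uebernehmen(p) and not _ist_tag(p)]
--     return {'DT': dt, 'DN': dn}
-- ===== Notes on version B (the rewrite author's own statement) =====
-- stated objective: alternative
-- what changed: A filters into two accumulators in one pass and then sorts each bucket; B stably sorts the raw records once by stripped name up front and then extracts DT and DN by two filtering comprehensions, with no per-bucket sorts (stability keyed only on name keeps tie order identical).
import Mathlib
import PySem

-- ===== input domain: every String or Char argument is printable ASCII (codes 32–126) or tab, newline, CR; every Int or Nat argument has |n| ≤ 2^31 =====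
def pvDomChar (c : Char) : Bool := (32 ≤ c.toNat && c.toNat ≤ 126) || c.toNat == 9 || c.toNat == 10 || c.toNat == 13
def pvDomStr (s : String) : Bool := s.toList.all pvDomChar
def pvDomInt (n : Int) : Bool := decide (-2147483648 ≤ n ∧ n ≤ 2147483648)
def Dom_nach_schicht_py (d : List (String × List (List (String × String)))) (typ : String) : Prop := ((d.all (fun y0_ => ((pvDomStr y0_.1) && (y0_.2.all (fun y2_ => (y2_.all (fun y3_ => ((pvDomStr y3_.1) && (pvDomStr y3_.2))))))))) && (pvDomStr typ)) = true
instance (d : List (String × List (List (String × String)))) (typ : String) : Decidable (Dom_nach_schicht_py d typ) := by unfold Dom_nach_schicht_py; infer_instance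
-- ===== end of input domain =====

-- B stably sorts the raw records once by stripped name and then extracts DT/DN by two
-- filtering comprehensions, instead of A's filtering pass into two buckets each sorted after.

-- ===== PORT A =====
-- shared module helpers _ist_tag / _zeit / the 'ist_krank' and name tests (identical in Source A and Source B)
def pvIstTag (p : List (String × String)) : Bool :=
  -- s = (p.get('start_zeit') or '00:00')[:5]
  let s0 := match PySem.Dict.get? (PySem.Dict.mk p) "start_zeit" with
            | some v => if v = "" then "00:00" else v
            | none => "00:00"
  let s := PySem.Str.slice s0 none (some 5)
  -- try: return int(s.split(':')[0]) < 14  except: return True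
  match PySem.Str.split? s ":" with
  | none => true          -- unreachable: separator ":" is nonempty
  | some parts =>
    match parts with
    | [] => true           -- unreachable: split never returns an empty list
    | t :: _ =>
      match PySem.Int.ofStr? t with
      | some n => decide (n < 14)   -- int succeeded
      | none => true                 -- ValueError caught by 'except'

def pvZeit (p : List (String × String)) : String :=
  let s := PySem.Str.slice ((PySem.Dict.get? (PySem.Dict.mk p) "start_zeit").getD "") none (some 5)
  let e := PySem.Str.slice ((PySem.Dict.get? (PySem.Dict.mk p) "end_zeit").getD "") none (some 5)
  if s ≠ "" ∧ e ≠ "" then s ++ "–" ++ e else ""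

-- p.get('ist_krank') in (True, 'True'): values are strings, so only 'True' can match
def pvKrank (p : List (String × String)) : Bool :=
  PySem.Dict.get? (PySem.Dict.mk p) "ist_krank" == some "True"

-- name = p.get('anzeigename', '').strip()
def pvName (p : List (String × String)) : String :=
  PySem.Str.strip (PySem.Dict.getD (PySem.Dict.mk p) "anzeigename" "")

def nach_schicht_py (d : List (String × List (List (String × String)))) (typ : String) : List (String × List (String × String)) :=
  let ps := PySem.Dict.getD (PySem.Dict.mk d) typ []
  let dtdn := ps.foldl (fun acc p =>
      if pvKrank p then acc
      else if pvName p = "" then acc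
      else if pvIstTag p then (acc.1 ++ [(pvName p, pvZeit p)], acc.2)
      else (acc.1, acc.2 ++ [(pvName p, pvZeit p)])) (([], []) : List (String × String) × List (String × String))
  [("DT", PySem.List.sorted dtdn.1 (fun x => x.1) false),
   ("DN", PySem.List.sorted dtdn.2 (fun x => x.1) false)]

-- ===== PORT B =====
-- _uebernehmen(p): not sick and stripped display name non-empty
def pvUeber (p : List (String × String)) : Bool := !pvKrank p && !(pvName p == "")

def nach_schicht_py_alt (d : List (String × List (List (String × String)))) (typ : String) : List (String × List (String × String)) :=
  -- geordnet = sorted(d.get(typ, []), key=lambda p: p.get('anzeigename','').strip())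
  let geordnet := PySem.List.sorted (PySem.Dict.getD (PySem.Dict.mk d) typ []) (fun p => pvName p) false
  -- the two list comprehensions: filter, then map to (name, zeit)
  [("DT", (geordnet.filter (fun p => pvUeber p && pvIstTag p)).map (fun p => (pvName p, pvZeit p))),
   ("DN", (geordnet.filter (fun p => pvUeber p && !pvIstTag p)).map (fun p => (pvName p, pvZeit p)))]

-- ===== PRECONDITION & SPEC =====
def Spec_nach_schicht_py (d : List (String × List (List (String × String)))) (typ : String) (out : List (String × List (String × String))) : Prop := out = nach_schicht_py_alt d typ
instance (d : List (String × List (List (String × String)))) (typ : String) (out : List (String × List (String × String))) : Decidable (Spec_nach_schicht_py d typ out) := by unfold Spec_nach_schicht_py; infer_instance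

-- ===== CLAIM (what is proved, stated in full; the proofs are below) =====
def Claim_equal_nach_schicht_py : Prop := ∀ (d : List (String × List (List (String × String)))) (typ : String), Dom_nach_schicht_py d typ → Spec_nach_schicht_py d typ (nach_schicht_py d typ)

-- ===== LEMMAS AND PROOFS =====

-- mapping commutes with insertion when the map preserves the key
theorem pv_ins_map {α β : Type} (g : α → β) (key : β → String) (x : α) (l : List α) :
    (PySem.List.insertBy (fun a b => decide (key (g a) < key (g b))) x l).map g
      = PySem.List.insertBy (fun a b => decide (key a < key b)) (g x) (l.map g) := by
  induction l with
  | nil => rfl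
  | cons y ys ih =>
    simp only [PySem.List.insertBy, List.map_cons]
    by_cases h : key (g x) < key (g y)
    · rw [if_pos (by simpa using h), if_pos (by simpa using h)]
      simp
    · rw [if_neg (by simpa using h), if_neg (by simpa using h)]
      simp only [List.map_cons]
      rw [ih]

-- stable sort commutes with a key-preserving map
theorem pv_sorted_map {α β : Type} (g : α → β) (key : β → String) (l : List α) :
    (PySem.List.sorted l (fun a => key (g a)) false).map g
      = PySem.List.sorted (l.map g) key false := by
  rw [PySem.List.sorted_eq_foldl_insertBy, PySem.List.sorted_eq_foldl_insertBy]
  suffices h : ∀ acc : List α,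
      (l.foldl (fun acc x => PySem.List.insertBy (fun a b => decide (key (g a) < key (g b))) x acc) acc).map g
        = (l.map g).foldl (fun acc x => PySem.List.insertBy (fun a b => decide (key a < key b)) x acc) (acc.map g) by
    exact h []
  induction l with
  | nil => intro acc; rfl
  | cons x xs ih =>
    intro acc
    simp only [List.foldl_cons, List.map_cons]
    rw [ih, pv_ins_map]

theorem pv_insertBy_all {α : Type} (b : α → α → Bool) (x : α) (l : List α)
    (h : ∀ z ∈ l, b x z = true) : PySem.List.insertBy b x l = x :: l := by
  cases l with
  | nil => rfl
  | cons y ys => simp [PySem.List.insertBy, h y (List.mem_cons_self ..)]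

theorem pv_pairwise_insertBy {α : Type} (key : α → String) (x : α) (l : List α)
    (h : l.Pairwise (fun a c => key a ≤ key c)) :
    (PySem.List.insertBy (fun a b => decide (key a < key b)) x l).Pairwise (fun a c => key a ≤ key c) := by
  induction l with
  | nil => simp [PySem.List.insertBy]
  | cons y ys ih =>
    rcases List.pairwise_cons.mp h with ⟨hy, hys⟩
    simp only [PySem.List.insertBy]
    by_cases hlt : key x < key y
    · rw [if_pos (by simpa using hlt)]
      refine List.pairwise_cons.mpr ⟨?_, h⟩
      intro z hz
      rcases List.mem_cons.mp hz with rfl | hz'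
      · exact le_of_lt hlt
      · exact le_trans (le_of_lt hlt) (hy z hz')
    · rw [if_neg (by simpa using hlt)]
      refine List.pairwise_cons.mpr ⟨?_, ih hys⟩
      intro z hz
      rcases (PySem.List.mem_insertBy _ _ _ _).mp hz with rfl | hz'
      · exact not_lt.mp hlt
      · exact hy z hz'

-- filtering commutes with insertion into a key-sorted list
theorem pv_filter_insertBy {α : Type} (key : α → String) (p : α → Bool) (x : α) (l : List α)
    (h : l.Pairwise (fun a c => key a ≤ key c)) :
    (PySem.List.insertBy (fun a b => decide (key a < key b)) x l).filter p
      = if p x then PySem.List.insertBy (fun a b => decide (key a < key b)) x (l.filter p)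
        else l.filter p := by
  induction l with
  | nil => by_cases hp : p x <;> simp [PySem.List.insertBy, hp]
  | cons y ys ih =>
    rcases List.pairwise_cons.mp h with ⟨hy, hys⟩
    simp only [PySem.List.insertBy]
    by_cases hlt : key x < key y
    · rw [if_pos (by simpa using hlt)]
      by_cases hp : p x
      · rw [if_pos hp, pv_insertBy_all, List.filter_cons_of_pos hp]
        intro z hz
        have hz' := (List.mem_filter.mp hz).1
        rcases List.mem_cons.mp hz' with rfl | hzz
        · simpa using hlt
        · simpa using lt_of_lt_of_le hlt (hy z hzz)
      · rw [if_neg hp, List.filter_cons_of_neg hp]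
    · rw [if_neg (by simpa using hlt)]
      by_cases hpy : p y
      · rw [List.filter_cons_of_pos hpy, ih hys, List.filter_cons_of_pos hpy]
        by_cases hp : p x
        · rw [if_pos hp, if_pos hp]
          simp only [PySem.List.insertBy]
          rw [if_neg (by simpa using hlt)]
        · rw [if_neg hp, if_neg hp]
      · rw [List.filter_cons_of_neg hpy, ih hys, List.filter_cons_of_neg hpy]

-- filtering commutes with a whole stable sort
theorem pv_sorted_filter {α : Type} (key : α → String) (p : α → Bool) (l : List α) :
    (PySem.List.sorted l key false).filter p = PySem.List.sorted (l.filter p) key false := by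
  rw [PySem.List.sorted_eq_foldl_insertBy, PySem.List.sorted_eq_foldl_insertBy]
  suffices h : ∀ acc : List α, acc.Pairwise (fun a c => key a ≤ key c) →
      (l.foldl (fun acc x => PySem.List.insertBy (fun a b => decide (key a < key b)) x acc) acc).filter p
        = (l.filter p).foldl (fun acc x => PySem.List.insertBy (fun a b => decide (key a < key b)) x acc) (acc.filter p) by
    exact h [] (List.Pairwise.nil)
  induction l with
  | nil => intro acc _; rfl
  | cons x xs ih =>
    intro acc hacc
    simp only [List.foldl_cons, List.filter_cons]
    rw [ih _ (pv_pairwise_insertBy key x acc hacc), pv_filter_insertBy key p x acc hacc]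
    by_cases hp : p x <;> simp [hp]

-- A's loop, split into the DT and DN accumulators (expressed with B's filter predicates)
theorem pvA_fold (ps : List (List (String × String))) :
    ps.foldl (fun acc p =>
      if pvKrank p then acc
      else if pvName p = "" then acc
      else if pvIstTag p then (acc.1 ++ [(pvName p, pvZeit p)], acc.2)
      else (acc.1, acc.2 ++ [(pvName p, pvZeit p)])) (([], []) : List (String × String) × List (String × String))
    = ((ps.filter (fun p => pvUeber p && pvIstTag p)).map (fun p => (pvName p, pvZeit p)),
       (ps.filter (fun p => pvUeber p && !pvIstTag p)).map (fun p => (pvName p, pvZeit p))) := by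
  have hstep : (fun (acc : List (String × String) × List (String × String)) p =>
      if pvKrank p then acc
      else if pvName p = "" then acc
      else if pvIstTag p then (acc.1 ++ [(pvName p, pvZeit p)], acc.2)
      else (acc.1, acc.2 ++ [(pvName p, pvZeit p)]))
    = fun acc p =>
      ((fun (a : List (String × String)) p =>
          if pvUeber p && pvIstTag p then a ++ [(pvName p, pvZeit p)] else a) acc.1 p,
       (fun (a : List (String × String)) p =>
          if pvUeber p && !pvIstTag p then a ++ [(pvName p, pvZeit p)] else a) acc.2 p) := by
    funext acc p
    by_cases hk : pvKrank p <;> by_cases hn : pvName p = "" <;> by_cases ht : pvIstTag p <;>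
      simp [pvUeber, hk, hn, ht]
  rw [hstep, PySem.List.foldl_prod_mk
        (f := fun (a : List (String × String)) p =>
          if pvUeber p && pvIstTag p then a ++ [(pvName p, pvZeit p)] else a)
        (g := fun (a : List (String × String)) p =>
          if pvUeber p && !pvIstTag p then a ++ [(pvName p, pvZeit p)] else a),
      PySem.List.foldl_append_if, PySem.List.foldl_append_if]
  simp

-- each side: A's sort-of-filtered-bucket equals B's filter-of-the-one-sorted-list, mapped
theorem pv_side (q : List (String × String) → Bool) (ps : List (List (String × String))) :
    ((PySem.List.sorted ps (fun p => pvName p) false).filter q).map (fun p => (pvName p, pvZeit p))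
      = PySem.List.sorted ((ps.filter q).map (fun p => (pvName p, pvZeit p))) (fun x => x.1) false := by
  rw [pv_sorted_filter (fun p => pvName p) q ps,
      ← pv_sorted_map (fun p => (pvName p, pvZeit p)) (fun x => x.1) (ps.filter q)]

-- ===== VERDICT (by name: the statement is the Claim_ definition above) =====
theorem nach_schicht_py_spec : Claim_equal_nach_schicht_py := by
  intro d typ _
  unfold Spec_nach_schicht_py
  simp only [nach_schicht_py, nach_schicht_py_alt, pvA_fold]
  rw [pv_side, pv_side]
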